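-- pv_equiv track=rewrite | github.com/superfm831010/bk-lite | server/apps/node_mgmt/utils/sidecar.py | format_tags_dynamic
-- ===== SOURCE A (Python) =====
-- from collections import defaultdict
--
-- def format_tags_dynamic(tags: list, allowed_prefixes: list):
--     result = defaultdict(list)
--     for tag in tags:
--         if ":" in tag:
--             key, value = tag.split(":", 1)
--             if not value:
--                 continue
--             if key in allowed_prefixes:
--                 value = value.split(",")
--                 result[key].extend(value)
--     return dict(result)
-- ===== SOURCE B (Python) =====
-- def format_tags_dynamic(tags: list, allowed_prefixes: list):
--     parsed = []
--     for tag in tags: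
--         parts = tag.split(":", 1)
--         if len(parts) == 2 and parts[1] and parts[0] in allowed_prefixes:
--             parsed.append((parts[0], parts[1]))
--     keys = []
--     for k, _ in parsed:
--         if k not in keys:
--             keys.append(k)
--     return {k: [p for k2, v in parsed if k2 == k for p in v.split(",")]
--             for k in keys}
-- ===== Notes on version B (the rewrite author's own statement) =====
-- stated objective: alternative
-- what changed: Replaces A's single pass that accumulates into a defaultdict with a three-phase pipeline: filter/parse tags into (key,value) pairs, dedup the keys in first-occurrence order, then build the dict by a per-key comprehension scanning the parsed pairs.
import Mathlib
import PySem

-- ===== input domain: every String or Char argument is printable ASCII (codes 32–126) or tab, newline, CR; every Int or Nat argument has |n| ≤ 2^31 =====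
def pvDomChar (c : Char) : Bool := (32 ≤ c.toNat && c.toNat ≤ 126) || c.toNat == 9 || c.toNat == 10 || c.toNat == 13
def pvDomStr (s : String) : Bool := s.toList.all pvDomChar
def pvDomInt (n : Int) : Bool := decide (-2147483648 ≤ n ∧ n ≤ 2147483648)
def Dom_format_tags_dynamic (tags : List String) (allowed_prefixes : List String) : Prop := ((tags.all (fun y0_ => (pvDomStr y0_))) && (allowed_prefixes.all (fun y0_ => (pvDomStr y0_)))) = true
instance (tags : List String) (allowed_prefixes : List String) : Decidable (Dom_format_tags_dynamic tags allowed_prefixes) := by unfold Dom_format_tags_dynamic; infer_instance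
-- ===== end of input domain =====

-- B replaces A's single defaultdict-accumulating pass by a three-phase pipeline
-- (parse/filter, dedup keys in first-occurrence order, per-key gathering); same
-- cost class, genuinely different structure (objective: alternative).

-- ===== PORT A =====
def format_tags_dynamic (tags : List String) (allowed_prefixes : List String) : List (String × List String) :=
  (tags.foldl (fun (result : PySem.Dict String (List String)) tag =>
      if PySem.Str.isIn ":" tag then
        -- key, value = tag.split(":", 1)  (exactly two pieces when ":" is in tag)
        let parts := (PySem.Str.splitMax? tag ":" 1).getD []
        let key := parts.getD 0 ""
        let value := parts.getD 1 ""
        if value = "" then result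
        else if allowed_prefixes.contains key then
          result.modify key [] (· ++ (PySem.Str.split? value ",").getD [])
        else result
      else result) PySem.Dict.empty).items

-- ===== PORT B =====
def format_tags_dynamic_alt (tags : List String) (allowed_prefixes : List String) : List (String × List String) :=
  let parsed := tags.foldl (fun acc tag =>
      let parts := (PySem.Str.splitMax? tag ":" 1).getD []
      if parts.length = 2 ∧ parts.getD 1 "" ≠ "" ∧ allowed_prefixes.contains (parts.getD 0 "") then
        acc ++ [(parts.getD 0 "", parts.getD 1 "")]
      else acc) []
  let keys := parsed.foldl (fun ks (p : String × String) => if ks.contains p.1 then ks else ks ++ [p.1]) []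
  keys.map (fun k => (k, parsed.flatMap (fun p => if p.1 == k then (PySem.Str.split? p.2 ",").getD [] else [])))

-- ===== PRECONDITION & SPEC =====
def Spec_format_tags_dynamic (tags : List String) (allowed_prefixes : List String) (out : List (String × List String)) : Prop := out = format_tags_dynamic_alt tags allowed_prefixes
instance (tags : List String) (allowed_prefixes : List String) (out : List (String × List String)) : Decidable (Spec_format_tags_dynamic tags allowed_prefixes out) := by unfold Spec_format_tags_dynamic; infer_instance

-- ===== CLAIM (what is proved, stated in full; the proofs are below) =====
def Claim_equal_format_tags_dynamic : Prop := ∀ (tags : List String) (allowed_prefixes : List String), Dom_format_tags_dynamic tags allowed_prefixes → Spec_format_tags_dynamic tags allowed_prefixes (format_tags_dynamic tags allowed_prefixes)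

-- ===== LEMMAS AND PROOFS =====

-- comma-splitting of a value (shared shape of both ports)
def pvSC (v : String) : List String := (PySem.Str.split? v ",").getD []

-- the selection both loops perform over one tag
def pvSel (allowed_prefixes : List String) (tag : String) : Option (String × String) :=
  let parts := (PySem.Str.splitMax? tag ":" 1).getD []
  if parts.length = 2 ∧ parts.getD 1 "" ≠ "" ∧ allowed_prefixes.contains (parts.getD 0 "") then
    some (parts.getD 0 "", parts.getD 1 "")
  else none

-- splitOnMax.go with maxsplit budget 0 returns what remains as a single piece
theorem pv_go_zero (sep : List Char) (fuel : Nat) (l cur : List Char) (acc : List (List Char)) :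
    PySem.Chars.splitOnMax.go sep fuel 0 l cur acc = ((cur.reverse ++ l) :: acc).reverse := by
  cases fuel with
  | zero => simp [PySem.Chars.splitOnMax.go]
  | succ n => cases l <;> simp [PySem.Chars.splitOnMax.go]

-- no separator anywhere: one single piece
theorem pv_go_one_noSep (sep : List Char) (fuel : Nat) :
    ∀ (l cur : List Char) (acc : List (List Char)), l.length < fuel →
      (∀ j, sep.isPrefixOf (l.drop j) = false) →
      PySem.Chars.splitOnMax.go sep fuel 1 l cur acc = ((cur.reverse ++ l) :: acc).reverse := by
  induction fuel with
  | zero => intro l cur acc h _; omega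
  | succ n ih =>
    intro l cur acc h hnp
    cases l with
    | nil => simp [PySem.Chars.splitOnMax.go]
    | cons c rest =>
      have h0 := hnp 0
      simp only [List.drop_zero] at h0
      simp only [PySem.Chars.splitOnMax.go, h0]
      rw [if_neg Nat.one_ne_zero, if_neg Bool.false_ne_true]
      rw [ih rest (c :: cur) acc (by simpa using Nat.lt_of_succ_lt_succ h)
        (fun j => by simpa using hnp (j + 1))]
      simp

-- a separator occurs: exactly two pieces are produced
theorem pv_go_one_sep (sep : List Char) (hsep : sep ≠ []) (fuel : Nat) :
    ∀ (l cur : List Char) (acc : List (List Char)), l.length < fuel →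
      (∃ j, sep.isPrefixOf (l.drop j) = true) →
      (PySem.Chars.splitOnMax.go sep fuel 1 l cur acc).length = acc.length + 2 := by
  induction fuel with
  | zero => intro l cur acc h _; omega
  | succ n ih =>
    intro l cur acc h hex
    cases l with
    | nil =>
      obtain ⟨j, hj⟩ := hex
      simp only [List.drop_nil] at hj
      rw [List.isPrefixOf_iff_prefix] at hj
      exact absurd (List.prefix_nil.mp hj) hsep
    | cons c rest =>
      by_cases hpre : sep.isPrefixOf (c :: rest) = true
      · simp only [PySem.Chars.splitOnMax.go, hpre]
        rw [if_neg Nat.one_ne_zero, if_pos trivial, pv_go_zero]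
        simp
      · simp only [Bool.not_eq_true] at hpre
        simp only [PySem.Chars.splitOnMax.go, hpre]
        rw [if_neg Nat.one_ne_zero, if_neg Bool.false_ne_true]
        apply ih rest (c :: cur) acc (by simpa using Nat.lt_of_succ_lt_succ h)
        obtain ⟨j, hj⟩ := hex
        cases j with
        | zero => simp only [List.drop_zero] at hj; rw [hj] at hpre; cases hpre
        | succ k => exact ⟨k, by simpa using hj⟩


-- normal form of tag.split(":", 1)
theorem pv_splitMax_norm (tag : String) : (PySem.Str.splitMax? tag ":" 1).getD [] =
    (PySem.Chars.splitOnMax.go [':'] (tag.toList.length + 1) 1 tag.toList [] []).map String.ofList := by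
  simp only [PySem.Str.splitMax?, PySem.Chars.splitMax?, PySem.Chars.splitOnMax,
    show (":" : String).toList = [':'] from rfl]
  norm_num

-- ":" not in tag: the split is [tag]
theorem pv_parts_noSep (tag : String) (h : PySem.Str.isIn ":" tag = false) :
    (PySem.Str.splitMax? tag ":" 1).getD [] = [tag] := by
  have h' : PySem.Chars.isIn [':'] tag.toList = false := by simpa using h
  have hnp : ∀ j, List.isPrefixOf [':'] (tag.toList.drop j) = false := by
    intro j
    by_contra hc
    rw [Bool.not_eq_false, List.isPrefixOf_iff_prefix] at hc
    have := (PySem.Chars.exists_prefix_drop_iff_isIn [':'] tag.toList).mp ⟨j, hc⟩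
    rw [this] at h'; cases h'
  rw [pv_splitMax_norm, pv_go_one_noSep [':'] _ _ _ _ (by omega) hnp]
  simp

-- ":" in tag: the split has exactly two pieces
theorem pv_parts_len (tag : String) (h : PySem.Str.isIn ":" tag = true) :
    ((PySem.Str.splitMax? tag ":" 1).getD []).length = 2 := by
  have h' : PySem.Chars.isIn [':'] tag.toList = true := by simpa using h
  rw [← PySem.Chars.exists_prefix_drop_iff_isIn] at h'
  obtain ⟨j, hj⟩ := h'
  rw [pv_splitMax_norm, List.length_map,
    pv_go_one_sep [':'] (by simp) _ _ _ _ (by omega) ⟨j, List.isPrefixOf_iff_prefix.mpr hj⟩]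
  rfl

-- one tag through A's branch structure, phrased with pvSel
theorem pv_stepA (allowed_prefixes : List String) (d : PySem.Dict String (List String)) (tag : String) :
    (if PySem.Str.isIn ":" tag then
        let parts := (PySem.Str.splitMax? tag ":" 1).getD []
        let key := parts.getD 0 ""
        let value := parts.getD 1 ""
        if value = "" then d
        else if allowed_prefixes.contains key then
          d.modify key [] (· ++ (PySem.Str.split? value ",").getD [])
        else d
      else d)
    = (match pvSel allowed_prefixes tag with
       | some p => d.modify p.1 [] (· ++ pvSC p.2)
       | none => d) := by
  by_cases hin : PySem.Str.isIn ":" tag = true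
  · obtain ⟨k, v, hp⟩ := List.length_eq_two.mp (pv_parts_len tag hin)
    have hin' : PySem.Chars.isIn [':'] tag.toList = true := by simpa using hin
    by_cases hv : v = ""
    · simp [pvSel, hin', hp, hv]
    · by_cases hk : k ∈ allowed_prefixes <;> simp [pvSel, pvSC, hin', hp, hv, hk]
  · have hin' : PySem.Chars.isIn [':'] tag.toList = false := by simpa using hin
    have hparts := pv_parts_noSep tag (by simpa using hin)
    simp [pvSel, hin', hparts]

-- one tag through B's filter, phrased with pvSel
theorem pv_stepB (allowed_prefixes : List String) (acc : List (String × String)) (tag : String) :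
    (let parts := (PySem.Str.splitMax? tag ":" 1).getD []
     if parts.length = 2 ∧ parts.getD 1 "" ≠ "" ∧ allowed_prefixes.contains (parts.getD 0 "") then
       acc ++ [(parts.getD 0 "", parts.getD 1 "")]
     else acc)
    = (match pvSel allowed_prefixes tag with
       | some p => acc ++ [p]
       | none => acc) := by
  unfold pvSel
  dsimp only
  split_ifs <;> rfl

-- A's loop = fold of modify-extend over the selected pairs
theorem pv_A_fold (allowed_prefixes : List String) (tags : List String) :
    ∀ d : PySem.Dict String (List String),
      tags.foldl (fun result tag =>
        if PySem.Str.isIn ":" tag then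
          let parts := (PySem.Str.splitMax? tag ":" 1).getD []
          let key := parts.getD 0 ""
          let value := parts.getD 1 ""
          if value = "" then result
          else if allowed_prefixes.contains key then
            result.modify key [] (· ++ (PySem.Str.split? value ",").getD [])
          else result
        else result) d
      = (tags.filterMap (pvSel allowed_prefixes)).foldl
          (fun d p => d.modify p.1 [] (· ++ pvSC p.2)) d := by
  induction tags with
  | nil => intro d; rfl
  | cons tag rest ih =>
    intro d
    rw [List.foldl_cons, pv_stepA, List.filterMap_cons]
    cases pvSel allowed_prefixes tag <;> simp only [ih, List.foldl_cons]

-- B's first loop = filterMap of pvSel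
theorem pv_B_parsed (allowed_prefixes : List String) (tags : List String) :
    ∀ acc : List (String × String),
      tags.foldl (fun acc tag =>
        let parts := (PySem.Str.splitMax? tag ":" 1).getD []
        if parts.length = 2 ∧ parts.getD 1 "" ≠ "" ∧ allowed_prefixes.contains (parts.getD 0 "") then
          acc ++ [(parts.getD 0 "", parts.getD 1 "")]
        else acc) acc
      = acc ++ tags.filterMap (pvSel allowed_prefixes) := by
  induction tags with
  | nil => intro acc; simp
  | cons tag rest ih =>
    intro acc
    rw [List.foldl_cons, pv_stepB, List.filterMap_cons]
    cases h : pvSel allowed_prefixes tag with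
    | none => exact ih acc
    | some p => rw [show (match some p with
        | some p => acc ++ [p]
        | none => acc) = acc ++ [p] from rfl, ih, List.append_assoc, List.singleton_append]

-- value accumulated at one key by the modify-extend fold
theorem pv_getD_fold (l : List (String × String)) :
    ∀ (d : PySem.Dict String (List String)) (c : String),
      (l.foldl (fun d p => d.modify p.1 [] (· ++ pvSC p.2)) d).getD c []
        = d.getD c [] ++ l.flatMap (fun p => if p.1 == c then pvSC p.2 else []) := by
  induction l with
  | nil => intro d c; simp
  | cons p t ih =>
    intro d c
    rw [List.foldl_cons, ih, List.flatMap_cons, PySem.Dict.getD_modify]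
    by_cases hc : c = p.1
    · simp [hc, List.append_assoc]
    · simp [hc, Ne.symm hc]

-- grouping a pair list: the dict fold's items = keys-in-first-occurrence-order map
theorem pv_group (l : List (String × String)) :
    (l.foldl (fun d p => d.modify p.1 [] (· ++ pvSC p.2)) PySem.Dict.empty).items
      = (l.foldl (fun ks (p : String × String) => if ks.contains p.1 then ks else ks ++ [p.1]) []).map
          (fun k => (k, l.flatMap (fun p => if p.1 == k then pvSC p.2 else []))) := by
  have hnd : (l.foldl (fun d p => d.modify p.1 [] (· ++ pvSC p.2)) PySem.Dict.empty).keys.Nodup :=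
    PySem.Dict.nodup_keys_foldl_modify_key l Prod.fst [] (fun _ p => (· ++ pvSC p.2))
      PySem.Dict.empty (by simp)
  rw [PySem.Dict.items_eq_map_keys _ hnd [],
    PySem.Dict.keys_foldl_modify_key l Prod.fst [] (fun _ p => (· ++ pvSC p.2)) PySem.Dict.empty]
  simp only [pv_getD_fold, PySem.Dict.getD_empty, List.nil_append,
    PySem.Set.update, PySem.Dict.keys_empty, List.foldl_map, PySem.Set.add]
  rfl

-- ===== VERDICT (by name: the statement is the Claim_ definition above) =====
theorem format_tags_dynamic_spec : Claim_equal_format_tags_dynamic := by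
  intro tags allowed_prefixes _
  unfold Spec_format_tags_dynamic format_tags_dynamic format_tags_dynamic_alt
  rw [pv_A_fold, pv_B_parsed]
  simp only [List.nil_append]
  exact pv_group _
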